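-- pv_equiv track=rewrite | github.com/lambdafate/leetcode | written-test/kuaishou-20fa/test4.py | solve
-- ===== SOURCE A (Python) =====
-- def solve(s1, s2):
--     ans = []
--     i, j = 0, 0
--     while i + 4 < len(s1) and j < len(s2):
--         for _ in range(4):
--             ans.append(s1[i])
--             i += 1
--         ans.append(s2[j])
--         j += 1
--     ans += s1[i:] + s2[j:]
--     return ans
-- ===== SOURCE B (Python) =====
-- def solve(s1, s2):
--     n = 0 if len(s1) < 5 else (len(s1) - 5) // 4 + 1
--     n = min(n, len(s2))
--     return ([c for k in range(n) for c in s1[4*k:4*k+4] + s2[k]]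
--             + list(s1[4*n:]) + list(s2[n:]))
-- ===== Notes on version B (the rewrite author's own statement) =====
-- stated objective: alternative
-- what changed: A's index-stepping while loop with a per-iteration length guard is replaced by a closed-form block count n = min(0 if len(s1)<5 else (len(s1)-5)//4+1, len(s2)) and a single comprehension over range(n) with slices, plus the two tails.
import Mathlib
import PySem

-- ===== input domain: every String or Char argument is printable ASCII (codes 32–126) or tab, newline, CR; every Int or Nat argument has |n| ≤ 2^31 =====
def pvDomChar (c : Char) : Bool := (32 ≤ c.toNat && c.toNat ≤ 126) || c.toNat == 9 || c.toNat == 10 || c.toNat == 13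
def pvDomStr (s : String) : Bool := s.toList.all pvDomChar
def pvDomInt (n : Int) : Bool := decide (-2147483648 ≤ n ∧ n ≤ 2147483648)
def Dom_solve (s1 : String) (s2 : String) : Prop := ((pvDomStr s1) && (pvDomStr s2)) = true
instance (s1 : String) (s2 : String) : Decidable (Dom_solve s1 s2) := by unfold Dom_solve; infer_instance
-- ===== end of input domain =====

-- B replaces A's index-stepping while loop by a closed-form block count n plus one comprehension
-- over range(n); same return value, different decomposition (objective: alternative).

-- a one-character Python string (what ans.append(s[i]) appends)
def chStr (c : Char) : String := String.mk [c]

-- ===== PORT A =====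
-- A's while loop; the indices i, j are carried as the suffixes l1 = s1[i:], l2 = s2[j:];
-- each iteration appends the next 4 chars of s1 (the inner 'for _ in range(4)') and one char of s2
def solveLoop (l1 l2 : List Char) : List String :=
  if h : 4 < l1.length ∧ l2 ≠ [] then
    (l1.take 4).map chStr ++ [chStr (l2.head h.2)] ++ solveLoop (l1.drop 4) l2.tail
  else (l1 ++ l2).map chStr
termination_by l1.length
decreasing_by simp; omega

def solve (s1 : String) (s2 : String) : List String :=
  solveLoop s1.toList s2.toList

-- ===== PORT B =====
-- Source B: n = 0 if len(s1) < 5 else (len(s1)-5)//4 + 1;  n = min(n, len(s2));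
-- return [c for k in range(n) for c in s1[4*k:4*k+4] + s2[k]] + list(s1[4*n:]) + list(s2[n:])
-- (s2[k] is always in range because k < n ≤ len(s2), so Option.toList is exact there)
def solve_alt (s1 : String) (s2 : String) : List String :=
  let l1 := s1.toList
  let l2 := s2.toList
  let n0 : Int := if l1.length < 5 then 0 else PySem.Int.floordiv ((l1.length : Int) - 5) 4 + 1
  let n : Int := min n0 (l2.length : Int)
  ((PySem.List.pyRange 0 n 1).flatMap (fun k =>
      (PySem.List.slice l1 (some (4*k)) (some (4*k+4)) ++ (PySem.List.pyGet? l2 k).toList).map chStr))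
    ++ (PySem.List.slice l1 (some (4*n)) none).map chStr
    ++ (PySem.List.slice l2 (some n) none).map chStr

-- ===== PRECONDITION & SPEC =====
def Spec_solve (s1 : String) (s2 : String) (out : List String) : Prop := out = solve_alt s1 s2
instance (s1 : String) (s2 : String) (out : List String) : Decidable (Spec_solve s1 s2 out) := by unfold Spec_solve; infer_instance

-- ===== CLAIM (what is proved, stated in full; the proofs are below) =====
def Claim_equal_solve : Prop := ∀ (s1 : String) (s2 : String), Dom_solve s1 s2 → Spec_solve s1 s2 (solve s1 s2)

-- ===== LEMMAS AND PROOFS =====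

-- Nat-side picture of B's block count and body
def blocksNat (n : Nat) : Nat := if n < 5 then 0 else (n - 5) / 4 + 1

def bodyNat (m : Nat) (l1 l2 : List Char) : List String :=
  (List.range m).flatMap (fun k => (((l1.drop (4*k)).take 4) ++ (l2[k]?).toList).map chStr)
    ++ (l1.drop (4*m)).map chStr ++ (l2.drop m).map chStr

lemma solveLoop_step (l1 l2 : List Char) (h : 4 < l1.length ∧ l2 ≠ []) :
    solveLoop l1 l2 = (l1.take 4).map chStr ++ [chStr (l2.head h.2)] ++ solveLoop (l1.drop 4) l2.tail := by
  rw [solveLoop]; simp [h]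

lemma solveLoop_base (l1 l2 : List Char) (h : ¬ (4 < l1.length ∧ l2 ≠ [])) :
    solveLoop l1 l2 = (l1 ++ l2).map chStr := by
  rw [solveLoop]; simp [h]

lemma bodyNat_eq_solveLoop : ∀ (m : Nat) (l1 l2 : List Char),
    m = min (blocksNat l1.length) l2.length → bodyNat m l1 l2 = solveLoop l1 l2 := by
  intro m
  induction m with
  | zero =>
    intro l1 l2 hm
    have hbase : ¬ (4 < l1.length ∧ l2 ≠ []) := by
      rintro ⟨h4, hne⟩
      have h2 : l2.length ≠ 0 := by simpa using hne
      have : blocksNat l1.length ≠ 0 := by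
        unfold blocksNat; split <;> omega
      omega
    rw [solveLoop_base l1 l2 hbase]
    simp [bodyNat]
  | succ m ih =>
    intro l1 l2 hm
    have hb : blocksNat l1.length ≥ m + 1 := by omega
    have h5 : 5 ≤ l1.length := by
      by_contra h
      have : blocksNat l1.length = 0 := by unfold blocksNat; rw [if_pos (by omega)]
      omega
    have hl2 : l2.length ≥ m + 1 := by omega
    obtain ⟨x, r2, rfl⟩ : ∃ x r2, l2 = x :: r2 := by
      cases l2 with
      | nil => simp at hl2
      | cons a t => exact ⟨a, t, rfl⟩
    have hcond : 4 < l1.length ∧ (x :: r2) ≠ [] := ⟨by omega, by simp⟩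
    rw [solveLoop_step l1 (x :: r2) hcond]
    simp only [List.head_cons, List.tail_cons]
    have hrec : m = min (blocksNat (l1.drop 4).length) r2.length := by
      unfold blocksNat at hb hm ⊢
      simp only [List.length_cons, List.length_drop] at hm ⊢
      split at hb <;> split at hm <;> split <;> omega
    rw [← ih (l1.drop 4) r2 hrec]
    unfold bodyNat
    rw [List.range_succ_eq_map]
    simp only [List.flatMap_cons, List.flatMap_map,
      Nat.mul_zero, List.drop_zero, List.getElem?_cons_zero, Option.toList_some]
    have hdd : ∀ k : Nat, l1.drop (4 * (k + 1)) = (l1.drop 4).drop (4 * k) := by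
      intro k; rw [List.drop_drop]; congr 1; omega
    simp only [hdd, List.getElem?_cons_succ, List.map_append]
    simp [List.append_assoc]

lemma alt_eq_bodyNat (s1 s2 : String) :
    solve_alt s1 s2 = bodyNat (min (blocksNat s1.toList.length) s2.toList.length) s1.toList s2.toList := by
  unfold solve_alt bodyNat
  simp only []
  set l1 := s1.toList with hl1
  set l2 := s2.toList with hl2
  set m := min (blocksNat l1.length) l2.length with hm
  have hn : (min (if l1.length < 5 then 0 else PySem.Int.floordiv ((l1.length : Int) - 5) 4 + 1) (l2.length : Int)) = (m : Int) := by
    unfold blocksNat at hm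
    split <;> rename_i h
    · rw [hm, if_pos h]; omega
    · rw [PySem.Int.floordiv_eq_ediv_of_pos (by omega), hm, if_neg h]
      omega
  rw [hn, PySem.List.pyRange_one]
  simp only [Int.sub_zero, Int.toNat_natCast]
  have hmul : ∀ k : Nat, (4 : Int) * (k : Nat) = ((4 * k : Nat) : Int) := by
    intro k; push_cast; ring
  have h4m : (4 : Int) * (m : Int) = ((4 * m : Nat) : Int) := by push_cast; ring
  rw [h4m, PySem.List.slice_from_natCast, PySem.List.slice_from_natCast, List.flatMap_map]
  congr 1
  congr 1
  congr 1
  funext k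
  simp only [zero_add, hmul]
  have hb4 : ((4 * k : Nat) : Int) + 4 = ((4 * k + 4 : Nat) : Int) := by push_cast; ring
  rw [hb4, PySem.List.slice_natCast, PySem.List.pyGet?_natCast]
  have h44 : 4 * k + 4 - 4 * k = 4 := by omega
  rw [h44]

-- ===== VERDICT (by name: the statement is the Claim_ definition above) =====
theorem solve_spec : Claim_equal_solve := by
  intro s1 s2 _
  unfold Spec_solve solve
  rw [alt_eq_bodyNat, bodyNat_eq_solveLoop _ _ _ rfl]
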